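-- pv_equiv track=rewrite | github.com/mattclarke/advent_of_code_20 | day_4/day_4.py | check_hcl
-- ===== SOURCE A (Python) =====
-- def check_hcl(value: str):
--     if not value.startswith("#") or len(value) != 7:
--         return False
--     allowed = [
--         "0",
--         "1",
--         "2",
--         "3",
--         "4",
--         "5",
--         "6",
--         "7",
--         "8",
--         "9",
--         "a",
--         "b",
--         "c",
--         "d",
--         "e",
--         "f",
--     ]
--     for c in value[1:]:
--         if c not in allowed:
--             return False
--     return True
-- ===== SOURCE B (Python) =====
-- import re
--
-- def check_hcl(value: str):
--     return bool(re.fullmatch(r"#[0-9a-f]{6}", value))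
-- ===== Notes on version B (the rewrite author's own statement) =====
-- stated objective: idiomatic
-- what changed: Replaced the startswith/len guard plus explicit character loop over an allowed-characters list with a single regular-expression fullmatch of #[0-9a-f]{6}.
import Mathlib
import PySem

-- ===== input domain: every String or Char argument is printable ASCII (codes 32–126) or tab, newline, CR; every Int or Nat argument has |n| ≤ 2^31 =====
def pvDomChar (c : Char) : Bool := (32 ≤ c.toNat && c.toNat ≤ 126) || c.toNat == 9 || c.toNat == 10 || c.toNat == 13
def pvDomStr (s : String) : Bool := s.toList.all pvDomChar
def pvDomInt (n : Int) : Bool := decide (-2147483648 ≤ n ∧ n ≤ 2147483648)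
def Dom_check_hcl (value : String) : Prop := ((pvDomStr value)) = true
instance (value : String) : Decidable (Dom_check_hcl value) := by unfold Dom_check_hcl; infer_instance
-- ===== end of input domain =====

-- B replaces A's startswith/len guard and explicit character loop by a regex-style full match of #[0-9a-f]{6} (idiomatic, same cost).

-- ===== PORT A =====
-- A's allowed list of 1-character strings; iteration over a str yields chars, so it is a Char list here
def checkHclAllowed : List Char :=
  ['0', '1', '2', '3', '4', '5', '6', '7', '8', '9', 'a', 'b', 'c', 'd', 'e', 'f']

-- the for-loop with early 'return False'
def checkHclLoop : List Char → Bool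
  | [] => true
  | c :: rest => if ¬ (checkHclAllowed.contains c) then false else checkHclLoop rest

def check_hcl (value : String) : Bool :=
  if ¬ (PySem.Str.startswith value "#") ∨ PySem.Str.len value ≠ 7 then false
  else checkHclLoop (PySem.List.slice value.toList (some 1) none)

-- ===== PORT B =====
-- the character class [0-9a-f] of the regex
def hclHexLower (c : Char) : Bool := ('0' ≤ c && c ≤ '9') || ('a' ≤ c && c ≤ 'f')

-- fullmatch of r"#[0-9a-f]{6}": a leading '#', then exactly six class characters, nothing after
def check_hcl_alt (value : String) : Bool :=
  match value.toList with
  | '#' :: rest => rest.length == 6 && rest.all hclHexLower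
  | _ => false

-- ===== PRECONDITION & SPEC =====
def Spec_check_hcl (value : String) (out : Bool) : Prop := out = check_hcl_alt value
instance (value : String) (out : Bool) : Decidable (Spec_check_hcl value out) := by unfold Spec_check_hcl; infer_instance

-- ===== CLAIM (what is proved, stated in full; the proofs are below) =====
def Claim_equal_check_hcl : Prop := ∀ (value : String), Dom_check_hcl value → Spec_check_hcl value (check_hcl value)

-- ===== LEMMAS AND PROOFS =====

lemma contains_allowed_eq_hex (c : Char) :
    checkHclAllowed.contains c = hclHexLower c := by
  rw [Bool.eq_iff_iff]
  simp only [checkHclAllowed, hclHexLower, List.contains_eq_mem, List.mem_cons, List.not_mem_nil,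
    or_false, decide_eq_true_eq, Bool.or_eq_true, Bool.and_eq_true, Char.ext_iff, Char.le_def,
    UInt32.le_iff_toNat_le, UInt32.ext_iff]
  simp only [show ('0'.val.toNat)=48 from rfl, show ('1'.val.toNat)=49 from rfl, show ('2'.val.toNat)=50 from rfl, show ('3'.val.toNat)=51 from rfl, show ('4'.val.toNat)=52 from rfl, show ('5'.val.toNat)=53 from rfl, show ('6'.val.toNat)=54 from rfl, show ('7'.val.toNat)=55 from rfl, show ('8'.val.toNat)=56 from rfl, show ('9'.val.toNat)=57 from rfl, show ('a'.val.toNat)=97 from rfl, show ('b'.val.toNat)=98 from rfl, show ('c'.val.toNat)=99 from rfl, show ('d'.val.toNat)=100 from rfl, show ('e'.val.toNat)=101 from rfl, show ('f'.val.toNat)=102 from rfl]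
  omega

lemma loop_eq_all (cs : List Char) : cs.all hclHexLower = checkHclLoop cs := by
  induction cs with
  | nil => rfl
  | cons c rest ih =>
      rw [List.all_cons, checkHclLoop, contains_allowed_eq_hex, ih]
      by_cases h : hclHexLower c = true <;> simp [h]

-- ===== VERDICT (by name: the statement is the Claim_ definition above) =====
theorem check_hcl_spec : Claim_equal_check_hcl := by
  intro value _
  unfold Spec_check_hcl check_hcl check_hcl_alt
  rw [PySem.List.slice_from_one]
  have hlen : PySem.Str.len value = (value.toList.length : Int) := PySem.Str.len_eq value
  cases hv : value.toList with
  | nil =>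
      simp [PySem.Str.startswith, PySem.Chars.startswith, hv]
  | cons c rest =>
      have hsw : PySem.Str.startswith value "#" = (c == '#') := by
        simp [PySem.Str.startswith, PySem.Chars.startswith, hv, List.isPrefixOf, eq_comm]
      rw [hsw, hlen, hv]
      by_cases hc : c = '#'
      · subst hc
        by_cases hl : rest.length = 6
        · simp [hl, loop_eq_all]
        · have h7 : (decide ((rest.length : Int) + 1 = 7)) = false := by
            simp; omega
          simp [hl, h7]
      · simp [hc]
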